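-- pv_equiv track=rewrite | github.com/Vutov/SideProjects | Coursera/Python3/Code/rat_weight.py | rat_race
-- ===== SOURCE A (Python) =====
-- def rat_race(rat_rate1, rat_rate2):
--     ''' (int) -> int
--
--     Return the number of weeks needed for the first rat to be 10 percent heavier than the second.
--
--     Preconditions:
--     Both rats have the same initial weight.
--     rat_rate1 > rat_rate2
--     rat_rate1, rat_rate2 = constant and > 0
--
--     >>> rat_race(2, 1)
--     10
--     >>> rat_race(8, 1)
--     2
--     '''
--
--     rat_weight1 = 0
--     rat_weight2 = 0
--     count = 0
--
--     while rat_weight1 < rat_weight2 + 10: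
--         rat_weight1 += rat_rate1
--         rat_weight2 += rat_rate2
--         count += 1
--
--     return count
-- ===== SOURCE B (Python) =====
-- def rat_race(rat_rate1, rat_rate2):
--     # closed form: smallest count with count*(rat_rate1-rat_rate2) >= 10,
--     # i.e. ceil(10 / (rat_rate1 - rat_rate2)) via floor division
--     return -(-10 // (rat_rate1 - rat_rate2))
-- ===== Notes on version B (the rewrite author's own statement) =====
-- stated objective: simpler
-- what changed: replaces the weekly accumulation while-loop by the closed-form ceiling division ceil(10/(rat_rate1-rat_rate2))
import Mathlib
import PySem

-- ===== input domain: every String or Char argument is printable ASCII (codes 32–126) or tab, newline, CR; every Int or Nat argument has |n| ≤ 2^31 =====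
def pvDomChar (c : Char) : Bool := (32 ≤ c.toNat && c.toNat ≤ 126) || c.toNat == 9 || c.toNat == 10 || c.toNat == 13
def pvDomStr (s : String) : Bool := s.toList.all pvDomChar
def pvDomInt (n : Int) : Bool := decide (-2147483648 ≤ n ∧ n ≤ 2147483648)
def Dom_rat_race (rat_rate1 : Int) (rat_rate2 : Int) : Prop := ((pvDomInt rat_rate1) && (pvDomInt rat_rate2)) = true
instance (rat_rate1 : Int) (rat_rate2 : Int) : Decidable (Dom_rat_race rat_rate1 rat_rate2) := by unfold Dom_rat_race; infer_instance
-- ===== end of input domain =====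

-- B replaces A's weekly-accumulation while-loop by the closed-form ceiling division ceil(10/(rat_rate1-rat_rate2)).

-- ===== PORT A =====
-- the while-loop of A; the 'r2 < r1' guard only makes the recursion total —
-- inputs with r1 ≤ r2 (where Python loops forever) are excluded by Pre_rat_race
def ratLoop (r1 r2 w1 w2 count : Int) : Int :=
  if _h1 : w1 < w2 + 10 then
    if _h2 : r2 < r1 then
      ratLoop r1 r2 (w1 + r1) (w2 + r2) (count + 1)
    else count
  else count
termination_by (w2 + 10 - w1).toNat
decreasing_by omega

def rat_race (rat_rate1 : Int) (rat_rate2 : Int) : Int :=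
  ratLoop rat_rate1 rat_rate2 0 0 0

-- ===== PORT B =====
def rat_race_alt (rat_rate1 : Int) (rat_rate2 : Int) : Int :=
  -(PySem.Int.floordiv (-10) (rat_rate1 - rat_rate2))

-- ===== PRECONDITION & SPEC =====
-- Pre_ excludes rat_rate1 ≤ rat_rate2: there Python A never returns (the while loop diverges)
def Pre_rat_race (rat_rate1 : Int) (rat_rate2 : Int) : Prop := rat_rate2 < rat_rate1
instance (rat_rate1 : Int) (rat_rate2 : Int) : Decidable (Pre_rat_race rat_rate1 rat_rate2) := by unfold Pre_rat_race; infer_instance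
def pvWitness_rat_race : Int × Int := (2, 1)

def Spec_rat_race (rat_rate1 : Int) (rat_rate2 : Int) (out : Int) : Prop := out = rat_race_alt rat_rate1 rat_rate2
instance (rat_rate1 : Int) (rat_rate2 : Int) (out : Int) : Decidable (Spec_rat_race rat_rate1 rat_rate2 out) := by unfold Spec_rat_race; infer_instance

-- ===== CLAIM (what is proved, stated in full; the proofs are below) =====
def Claim_equal_rat_race : Prop := ∀ (rat_rate1 : Int) (rat_rate2 : Int), Dom_rat_race rat_rate1 rat_rate2 → Pre_rat_race rat_rate1 rat_rate2 → Spec_rat_race rat_rate1 rat_rate2 (rat_race rat_rate1 rat_rate2)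

-- ===== LEMMAS AND PROOFS =====

-- invariant of A's loop: with remaining gap g = w2 + 10 - w1 and positive weekly
-- gain d = r1 - r2, the loop adds max 0 ⌈g/d⌉ to the counter
lemma ratLoop_closed (r1 r2 w1 w2 c : Int) (h : r2 < r1) :
    ratLoop r1 r2 w1 w2 c
      = c + max 0 (-(PySem.Int.floordiv (w1 - w2 - 10) (r1 - r2))) := by
  induction w1, w2, c using ratLoop.induct r1 r2 with
  | case1 w1 w2 c h1 h2 ih =>
    rw [ratLoop]
    simp only [h1, h2, dif_pos]
    rw [ih]
    have hd : (0:Int) < r1 - r2 := by omega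
    have hstep : PySem.Int.floordiv (w1 + r1 - (w2 + r2) - 10) (r1 - r2)
        = PySem.Int.floordiv (w1 - w2 - 10) (r1 - r2) + 1 := by
      have := PySem.Int.floordiv_eq_ediv_of_pos (a := w1 + r1 - (w2 + r2) - 10) hd
      have := PySem.Int.floordiv_eq_ediv_of_pos (a := w1 - w2 - 10) hd
      have h3 : w1 + r1 - (w2 + r2) - 10 = (w1 - w2 - 10) + 1 * (r1 - r2) := by ring
      rw [‹PySem.Int.floordiv (w1 + r1 - (w2 + r2) - 10) (r1 - r2) = _›,
          ‹PySem.Int.floordiv (w1 - w2 - 10) (r1 - r2) = _›, h3,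
          Int.add_mul_ediv_right _ _ (by omega)]
    have hneg : PySem.Int.floordiv (w1 - w2 - 10) (r1 - r2) < 0 := by
      rw [PySem.Int.floordiv_lt_iff_lt_mul hd]; omega
    omega
  | case2 w1 w2 c h1 h2 =>
    exact absurd h h2
  | case3 w1 w2 c h1 =>
    rw [ratLoop]
    simp only [h1, dif_neg, not_false_iff]
    have hd : (0:Int) < r1 - r2 := by omega
    have hpos : 0 ≤ PySem.Int.floordiv (w1 - w2 - 10) (r1 - r2) := by
      rw [PySem.Int.le_floordiv_iff_mul_le hd]; omega
    omega

-- ===== VERDICT (by name: the statement is the Claim_ definition above) =====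
theorem rat_race_spec : Claim_equal_rat_race := by
  intro r1 r2 _hdom hpre
  unfold Pre_rat_race at hpre
  unfold Spec_rat_race rat_race rat_race_alt
  rw [ratLoop_closed r1 r2 0 0 0 hpre]
  have hd : (0:Int) < r1 - r2 := by omega
  have hneg : PySem.Int.floordiv (0 - 0 - 10) (r1 - r2) < 0 := by
    rw [PySem.Int.floordiv_lt_iff_lt_mul hd]; omega
  have h10 : (0:Int) - 0 - 10 = -10 := by ring
  rw [h10] at hneg ⊢
  omega
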